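-- pv_equiv track=rewrite | github.com/qcstyrogit-main/erp_ai_assistant | erp_ai_assistant/api/tools/export.py | _summary_group_fields
-- ===== SOURCE A (Python) =====
-- from typing import Any, Dict, List
--
-- def _summary_group_fields(rows: list[dict[str, Any]]) -> list[str]:
--     if not rows:
--         return []
--     keys = {key for row in rows if isinstance(row, dict) for key in row.keys()}
--     ordered = [
--         "territory", "payment_terms", "department", "designation",
--         "customer_group", "supplier_group", "status", "company", "currency",
--         "item_group", "warehouse", "cost_center", "project", "employee_type",
--     ]
--     return [field for field in ordered if field in keys]
-- ===== SOURCE B (Python) =====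
-- from typing import Any, Dict, List
--
-- _ORDERED = [
--     "territory", "payment_terms", "department", "designation",
--     "customer_group", "supplier_group", "status", "company", "currency",
--     "item_group", "warehouse", "cost_center", "project", "employee_type",
-- ]
--
-- def _summary_group_fields(rows: list[dict[str, Any]]) -> list[str]:
--     return [
--         f for f in _ORDERED
--         if any(f in row for row in rows if isinstance(row, dict))
--     ]
-- ===== Notes on version B (the rewrite author's own statement) =====
-- stated objective: simpler
-- what changed: Drops the key-set construction and the empty-rows guard: B directly scans the rows for each of the 14 fixed candidate fields with any(), which short-circuits at the first row containing the field instead of collecting every key of every row into a set first.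
import Mathlib
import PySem

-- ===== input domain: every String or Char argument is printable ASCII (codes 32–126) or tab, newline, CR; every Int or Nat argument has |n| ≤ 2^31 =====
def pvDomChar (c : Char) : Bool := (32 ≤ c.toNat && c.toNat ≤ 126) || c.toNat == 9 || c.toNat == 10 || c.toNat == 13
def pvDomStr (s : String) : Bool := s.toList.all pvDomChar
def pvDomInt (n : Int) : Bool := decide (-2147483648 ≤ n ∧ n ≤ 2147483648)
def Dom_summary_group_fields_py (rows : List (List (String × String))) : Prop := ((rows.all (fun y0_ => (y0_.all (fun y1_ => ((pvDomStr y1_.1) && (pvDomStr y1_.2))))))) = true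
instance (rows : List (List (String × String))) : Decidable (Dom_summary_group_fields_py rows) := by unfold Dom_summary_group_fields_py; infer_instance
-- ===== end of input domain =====

-- B replaces A's build-a-key-set-then-filter with a direct per-candidate scan of the rows (simpler: no set, no empty-rows guard).


-- the fixed ordered candidate list (shared constant of both Pythons)
def pvOrderedFields : List String :=
  ["territory", "payment_terms", "department", "designation",
   "customer_group", "supplier_group", "status", "company", "currency",
   "item_group", "warehouse", "cost_center", "project", "employee_type"]

-- ===== PORT A =====
-- A: early return on empty rows; build the set of all keys; filter the ordered list by membership.
-- (In the List (List (String × String)) encoding every row is a dict, so 'isinstance(row, dict)' is always true.)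
def summary_group_fields_py (rows : List (List (String × String))) : List String :=
  if rows = [] then []
  else
    let keys : PySem.Set String := PySem.Set.ofList (rows.flatMap (fun row => row.map Prod.fst))
    pvOrderedFields.filter (fun field => PySem.Set.contains keys field)

-- ===== PORT B =====
-- B: for each candidate field, scan the rows asking whether any row contains it.
def summary_group_fields_py_alt (rows : List (List (String × String))) : List String :=
  pvOrderedFields.filter (fun f => rows.any (fun row => row.any (fun kv => kv.1 == f)))

-- ===== PRECONDITION & SPEC =====
def Spec_summary_group_fields_py (rows : List (List (String × String))) (out : List String) : Prop := out = summary_group_fields_py_alt rows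
instance (rows : List (List (String × String))) (out : List String) : Decidable (Spec_summary_group_fields_py rows out) := by unfold Spec_summary_group_fields_py; infer_instance

-- ===== CLAIM (what is proved, stated in full; the proofs are below) =====
def Claim_equal_summary_group_fields_py : Prop := ∀ (rows : List (List (String × String))), Dom_summary_group_fields_py rows → Spec_summary_group_fields_py rows (summary_group_fields_py rows)

-- ===== LEMMAS AND PROOFS =====

-- the two membership tests agree on every field
set_option maxRecDepth 4096 in
theorem pv_pred_eq (rows : List (List (String × String))) (f : String) :
    PySem.Set.contains (PySem.Set.ofList (rows.flatMap (fun row => row.map Prod.fst))) f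
      = rows.any (fun row => row.any (fun kv => kv.1 == f)) := by
  rw [Bool.eq_iff_iff]
  simp only [PySem.Set.contains_eq_listContains, List.contains_eq_mem,
    decide_eq_true_eq, PySem.Set.mem_ofList, List.mem_flatMap, List.mem_map, List.any_eq_true,
    beq_iff_eq]

-- ===== VERDICT (by name: the statement is the Claim_ definition above) =====
set_option maxRecDepth 4096 in
theorem summary_group_fields_py_spec : Claim_equal_summary_group_fields_py := by
  intro rows _
  unfold Spec_summary_group_fields_py summary_group_fields_py summary_group_fields_py_alt
  by_cases h : rows = []
  · subst h; decide
  · simp only [if_neg h]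
    exact List.filter_congr (fun f _ => pv_pred_eq rows f)
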